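-- pv_equiv track=rewrite | github.com/davisbuilds/mlsearch | src/mlsearch/pipelines/generate_queries.py | select_salient_ngram
-- ===== SOURCE A (Python) =====
-- def select_salient_ngram(abstract_tokens: list[str], title_token_set: set[str]) -> list[str]:
--     if not abstract_tokens:
--         return []
--
--     best_tokens: list[str] = []
--     best_score = float("-inf")
--     for width in range(2, min(4, len(abstract_tokens)) + 1):
--         for start in range(0, len(abstract_tokens) - width + 1):
--             tokens = abstract_tokens[start : start + width]
--             novelty = sum(1 for token in tokens if token not in title_token_set)
--             title_overlap = width - novelty
--             score = (novelty * 3.0) + width - (title_overlap * 0.75)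
--             if novelty == 0:
--                 score -= 2.0
--             if score > best_score:
--                 best_score = score
--                 best_tokens = tokens
--     return best_tokens or abstract_tokens[:3]
-- ===== SOURCE B (Python) =====
-- def select_salient_ngram(abstract_tokens: list[str], title_token_set: set[str]) -> list[str]:
--     n = len(abstract_tokens)
--     if n < 2:
--         return abstract_tokens[:3]
--     # prefix sums of the "novel token" indicator
--     pref = [0]
--     for token in abstract_tokens:
--         pref.append(pref[-1] + (0 if token in title_token_set else 1))
--     # per width, find the first window of maximal novelty; compare widths by
--     # the exact score (all scores are multiples of 0.25, so compare 4*score as ints)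
--     best = None  # (score4, start, width)
--     for width in range(2, min(4, n) + 1):
--         bn, bs = -1, 0
--         for start in range(n - width + 1):
--             nov = pref[start + width] - pref[start]
--             if nov > bn:
--                 bn, bs = nov, start
--         s4 = bn * 15 + width
--         if bn == 0:
--             s4 -= 8
--         if best is None or s4 > best[0]:
--             best = (s4, bs, width)
--     _, s, w = best
--     return abstract_tokens[s:s + w]
-- ===== Notes on version B (the rewrite author's own statement) =====
-- stated objective: faster
-- what changed: B replaces A's per-window slice-and-rescan and float running-max with a prefix-sum array of novelty indicators (O(1) novelty per window), a per-width first-argmax-novelty scan, and a final comparison of the at most three per-width candidates via the integer value 4*score.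
import Mathlib
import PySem

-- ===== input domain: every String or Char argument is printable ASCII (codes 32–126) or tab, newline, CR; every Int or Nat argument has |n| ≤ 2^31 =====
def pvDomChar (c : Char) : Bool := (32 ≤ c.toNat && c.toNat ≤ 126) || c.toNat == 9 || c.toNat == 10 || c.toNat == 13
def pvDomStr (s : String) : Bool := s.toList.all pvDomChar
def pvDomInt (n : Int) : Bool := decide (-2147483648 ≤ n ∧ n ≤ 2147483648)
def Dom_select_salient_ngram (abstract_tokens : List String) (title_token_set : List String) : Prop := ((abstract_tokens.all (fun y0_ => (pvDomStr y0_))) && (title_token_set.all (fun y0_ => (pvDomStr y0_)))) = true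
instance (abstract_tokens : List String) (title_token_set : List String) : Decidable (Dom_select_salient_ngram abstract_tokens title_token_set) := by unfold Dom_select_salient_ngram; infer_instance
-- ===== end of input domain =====

-- B replaces A's per-window rescans and float running-max with a novelty prefix-sum array,
-- a per-width first-argmax scan, and a final comparison of the per-width candidates (objective: faster,
-- by a constant factor: no per-window slice or rescan; a timing run measured it).
-- Python float scores are exact here (small multiples of 0.25): both ports compare 4*score as Int.

-- ===== PORT A =====
-- float('-inf') / a float score b: the running best score is `none` (= -inf) or `some (4*score)`
def pvOptLt : Option Int → Int → Bool
  | none, _ => true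
  | some b, s => decide (b < s)

-- the body of A's inner loop (tokens slice, novelty count, score, strict-> update)
def pvStepA (ats tts : List String) (width : Int) (st : List String × Option Int) (start : Int) :
    List String × Option Int :=
  let tokens := PySem.List.slice ats (some start) (some (start + width))
  let novelty : Int := ((tokens.filter (fun t => !(tts.contains t))).length : Int)
  let title_overlap := width - novelty
  -- 4*score = novelty*12 + width*4 - title_overlap*3 (exact float arithmetic)
  let score := novelty * 12 + width * 4 - title_overlap * 3
  let score := if novelty = 0 then score - 8 else score
  if pvOptLt st.2 score then (tokens, some score) else st

def select_salient_ngram (abstract_tokens : List String) (title_token_set : List String) : List String :=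
  if abstract_tokens = [] then []
  else
    let n : Int := (abstract_tokens.length : Int)
    let best :=
      (PySem.List.pyRange 2 (min 4 n + 1) 1).foldl
        (fun st width =>
          (PySem.List.pyRange 0 (n - width + 1) 1).foldl
            (pvStepA abstract_tokens title_token_set width) st)
        ([], none)
    if best.1 = [] then PySem.List.slice abstract_tokens none (some 3) else best.1

-- ===== PORT B =====
def pvFlag (tts : List String) (t : String) : Int := if tts.contains t then 0 else 1

-- body of B's inner loop: first start of maximal novelty (novelty from the prefix sums)
def pvStepB (pref : List Int) (width : Int) (p : Int × Int) (start : Int) : Int × Int :=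
  let nov := PySem.List.pyGetD pref (start + width) 0 - PySem.List.pyGetD pref start 0
  if p.1 < nov then (nov, start) else p

-- body of B's outer loop: candidate (4*score, start, width) for one width, merged into best
def pvOuterB (n : Int) (pref : List Int) (best : Option (Int × Int × Int)) (width : Int) :
    Option (Int × Int × Int) :=
  let scan := (PySem.List.pyRange 0 (n - width + 1) 1).foldl (pvStepB pref width) (-1, 0)
  let s4 := scan.1 * 15 + width
  let s4 := if scan.1 = 0 then s4 - 8 else s4
  match best with
  | none => some (s4, scan.2, width)
  | some b => if b.1 < s4 then some (s4, scan.2, width) else best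

def select_salient_ngram_alt (abstract_tokens : List String) (title_token_set : List String) : List String :=
  let n : Int := (abstract_tokens.length : Int)
  if n < 2 then PySem.List.slice abstract_tokens none (some 3)
  else
    let pref := abstract_tokens.foldl
      (fun pref token => pref ++ [PySem.List.pyGetD pref (-1) 0 + pvFlag title_token_set token])
      [(0 : Int)]
    let best := (PySem.List.pyRange 2 (min 4 n + 1) 1).foldl (pvOuterB n pref) none
    match best with
    | some (_, s, w) => PySem.List.slice abstract_tokens (some s) (some (s + w))
    | none => []

-- ===== PRECONDITION & SPEC =====
def Spec_select_salient_ngram (abstract_tokens : List String) (title_token_set : List String) (out : List String) : Prop := out = select_salient_ngram_alt abstract_tokens title_token_set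
instance (abstract_tokens : List String) (title_token_set : List String) (out : List String) : Decidable (Spec_select_salient_ngram abstract_tokens title_token_set out) := by unfold Spec_select_salient_ngram; infer_instance

-- ===== CLAIM (what is proved, stated in full; the proofs are below) =====
def Claim_equal_select_salient_ngram : Prop := ∀ (abstract_tokens : List String) (title_token_set : List String), Dom_select_salient_ngram abstract_tokens title_token_set → Spec_select_salient_ngram abstract_tokens title_token_set (select_salient_ngram abstract_tokens title_token_set)

-- ===== LEMMAS AND PROOFS =====

-- A's novelty of the window [start, start+width)
def pvNovA (ats tts : List String) (start width : Int) : Int :=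
  (((PySem.List.slice ats (some start) (some (start + width))).filter
      (fun t => !(tts.contains t))).length : Int)

-- A's 4*score as a function of width and novelty
def pvScoreA (width novelty : Int) : Int :=
  if novelty = 0 then novelty * 12 + width * 4 - (width - novelty) * 3 - 8
  else novelty * 12 + width * 4 - (width - novelty) * 3

-- running prefix sums (the list B's append loop builds)
def pvPrefixSums : Int → List Int → List Int
  | a, [] => [a]
  | a, v :: vs => a :: pvPrefixSums (a + v) vs

lemma pvPref_build (tts : List String) (l : List String) :
    ∀ (init : List Int) (a : Int),
      l.foldl (fun p t => p ++ [PySem.List.pyGetD p (-1) 0 + pvFlag tts t]) (init ++ [a])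
        = init ++ pvPrefixSums a (l.map (pvFlag tts)) := by
  induction l with
  | nil => intro init a; simp [pvPrefixSums]
  | cons t l ih =>
      intro init a
      simp only [List.foldl_cons, PySem.List.pyGetD_neg_one_append_singleton, List.map_cons,
        pvPrefixSums]
      rw [ih (init ++ [a]) (a + pvFlag tts t)]
      simp

lemma pvPref_getD (l : List Int) : ∀ (a : Int) (i : Nat), i ≤ l.length →
    (pvPrefixSums a l).getD i 0 = a + (l.take i).sum := by
  induction l with
  | nil =>
      intro a i h
      simp only [List.length_nil, Nat.le_zero] at h
      subst h
      simp [pvPrefixSums]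
  | cons v vs ih =>
      intro a i h
      cases i with
      | zero => simp [pvPrefixSums]
      | succ i =>
          simp only [pvPrefixSums, List.getD_cons_succ, List.take_succ_cons, List.sum_cons]
          rw [ih (a + v) i (by simpa using h)]
          ring

-- the novelty B reads off the prefix sums equals A's window count
lemma pvFlag_sum (tts : List String) (l : List String) :
    (l.map (pvFlag tts)).sum = ((l.filter (fun t => !(tts.contains t))).length : Int) := by
  have h : l.map (pvFlag tts)
      = l.map (fun x => if (!(tts.contains x)) = true then (1 : Int) else 0) := by
    apply List.map_congr_left
    intro x _
    simp only [pvFlag]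
    cases tts.contains x <;> simp
  rw [h, PySem.List.sum_map_ite_one_zero, List.countP_eq_length_filter]

-- the novelty B reads off the prefix sums equals A's window count
lemma pvNov_eq (ats tts : List String) (s w : Int) (hs : 0 ≤ s) (hw : 0 ≤ w)
    (hsw : s + w ≤ (ats.length : Int)) :
    PySem.List.pyGetD (pvPrefixSums 0 (ats.map (pvFlag tts))) (s + w) 0
      - PySem.List.pyGetD (pvPrefixSums 0 (ats.map (pvFlag tts))) s 0
      = pvNovA ats tts s w := by
  have hswn : (s + w).toNat = s.toNat + w.toNat := by omega
  rw [PySem.List.pyGetD_of_nonneg _ _ (by omega : (0:Int) ≤ s + w),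
    PySem.List.pyGetD_of_nonneg _ _ hs,
    pvPref_getD _ _ _ (by simp; omega), pvPref_getD _ _ _ (by simp; omega), hswn,
    List.take_add, List.sum_append, ← List.map_drop, ← List.map_take, ← List.map_take,
    pvFlag_sum, pvFlag_sum]
  unfold pvNovA
  rw [PySem.List.slice_toNat _ hs (by omega), hswn]
  simp only [Nat.add_sub_cancel_left]
  omega

-- state of A's inner loop rendered from the state of B's inner scan
def pvRender (G : Option Int) (BT : List String) (h : Int → List String) (f : Int → Int)
    (p : Int × Int) : List String × Option Int :=
  if p.1 = -1 then (BT, G)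
  else if pvOptLt G (f p.1) then (h p.2, some (f p.1)) else (BT, G)

-- one step of A's loop tracks one step of B's argmax scan
lemma pvStep_render (G : Option Int) (BT : List String) (h : Int → List String) (f nv : Int → Int)
    (hf : ∀ a b : Int, 0 ≤ a → 0 ≤ b → (f a < f b ↔ a < b))
    (p : Int × Int) (hp : p.1 = -1 ∨ 0 ≤ p.1) (x : Int) (hx : 0 ≤ nv x) :
    (if pvOptLt (pvRender G BT h f p).2 (f (nv x)) then (h x, some (f (nv x)))
       else pvRender G BT h f p)
      = pvRender G BT h f (if p.1 < nv x then (nv x, x) else p) := by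
  have hx' : ¬ (nv x = -1) := by omega
  rcases hp with hp | hp
  · have hlt : p.1 < nv x := by omega
    cases G <;>
      simp [pvRender, pvOptLt, hp, hx', show (-1:Int) < nv x by omega]
  · have hne : ¬ (p.1 = -1) := by omega
    by_cases hc : p.1 < nv x
    · have hlt2 : f p.1 < f (nv x) := by have := hf p.1 (nv x) hp hx; omega
      cases G <;>
      · simp only [pvRender, pvOptLt, decide_eq_true_eq, hne, if_false, if_pos hc]
        split_ifs <;> first | rfl | omega | (simp only [decide_eq_true_eq] at *; omega)
    · have hle : f (nv x) ≤ f p.1 := by have := hf p.1 (nv x) hp hx; omega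
      cases G <;>
      · simp only [pvRender, pvOptLt, decide_eq_true_eq, hne, if_false, if_neg hc]
        split_ifs <;> first | rfl | omega | (simp only [decide_eq_true_eq] at *; omega)

-- A's whole inner loop from a rendered state is the render of B's whole scan
lemma pvFold_render (G : Option Int) (BT : List String) (h : Int → List String) (f nv : Int → Int)
    (hf : ∀ a b : Int, 0 ≤ a → 0 ≤ b → (f a < f b ↔ a < b)) :
    ∀ (L : List Int), (∀ x ∈ L, 0 ≤ nv x) → ∀ (p : Int × Int), (p.1 = -1 ∨ 0 ≤ p.1) →
      L.foldl (fun st x => if pvOptLt st.2 (f (nv x)) then (h x, some (f (nv x))) else st)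
          (pvRender G BT h f p)
        = pvRender G BT h f (L.foldl (fun q x => if q.1 < nv x then (nv x, x) else q) p) := by
  intro L
  induction L with
  | nil => intro _ p _; rfl
  | cons x t ih =>
      intro hnv p hp
      simp only [List.foldl_cons]
      rw [pvStep_render G BT h f nv hf p hp x (hnv x (by simp))]
      refine ih (fun y hy => hnv y (by simp [hy])) _ ?_
      by_cases hc : p.1 < nv x
      · right; simp [hc]; exact hnv x (by simp)
      · simpa [hc] using hp

-- B's scan over a nonempty list lands on some element's (novelty, start)
lemma pvScan_shape (nv : Int → Int) :
    ∀ (L : List Int) (p : Int × Int),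
      L.foldl (fun q x => if q.1 < nv x then (nv x, x) else q) p = p
        ∨ ∃ x ∈ L, L.foldl (fun q x => if q.1 < nv x then (nv x, x) else q) p = (nv x, x) := by
  intro L
  induction L with
  | nil => intro p; left; rfl
  | cons x t ih =>
      intro p
      simp only [List.foldl_cons]
      by_cases hc : p.1 < nv x
      · rcases ih (nv x, x) with h | ⟨y, hy, h⟩
        · right; exact ⟨x, by simp, by simp [hc, h]⟩
        · right; exact ⟨y, by simp [hy], by simp [hc, h]⟩
      · rcases ih p with h | ⟨y, hy, h⟩
        · left; simp [hc, h]
        · right; exact ⟨y, by simp [hy], by simp [hc, h]⟩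

lemma pvScan_mem (nv : Int → Int) (a b : Int) (hab : a < b) (hnv : ∀ x, 0 ≤ nv x) :
    ∃ x, a ≤ x ∧ x < b ∧
      (PySem.List.pyRange a b 1).foldl (fun q x => if q.1 < nv x then (nv x, x) else q) (-1, 0)
        = (nv x, x) := by
  rw [PySem.List.pyRange_one_cons hab]
  simp only [List.foldl_cons]
  have hc : (-1 : Int) < nv a := by have := hnv a; omega
  simp only [if_pos (show ((-1, 0) : Int × Int).1 < nv a by simpa using hc)]
  rcases pvScan_shape nv (PySem.List.pyRange (a+1) b 1) (nv a, a) with h | ⟨y, hy, h⟩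
  · exact ⟨a, le_refl a, hab, h⟩
  · rw [PySem.List.mem_pyRange_one] at hy
    exact ⟨y, by omega, by omega, h⟩

-- render of B's outer state
def pvRenderO (ats : List String) (b : Option (Int × Int × Int)) : List String × Option Int :=
  match b with
  | none => ([], none)
  | some (s4, s, w) => (PySem.List.slice ats (some s) (some (s + w)), some s4)

def pvValid (n : Int) (b : Option (Int × Int × Int)) : Prop :=
  match b with
  | none => True
  | some (_, s, w) => 0 ≤ s ∧ 2 ≤ w ∧ s + w ≤ n

lemma pvScoreA_mono (w : Int) : ∀ a b : Int, 0 ≤ a → 0 ≤ b →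
    (pvScoreA w a < pvScoreA w b ↔ a < b) := by
  intro a b ha hb
  unfold pvScoreA
  split <;> split <;> omega

-- one outer step: A's inner loop over one width = B's candidate merge, rendered
lemma pvScore_bridge (w b : Int) :
    (if b = 0 then b * 15 + w - 8 else b * 15 + w) = pvScoreA w b := by
  unfold pvScoreA
  split <;> omega

lemma pvOuter_step (ats tts : List String) (w : Int) (hw2 : 2 ≤ w)
    (hwn : w ≤ (ats.length : Int)) (b : Option (Int × Int × Int))
    (hb : pvValid (ats.length : Int) b) :
    (PySem.List.pyRange 0 ((ats.length : Int) - w + 1) 1).foldl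
        (pvStepA ats tts w) (pvRenderO ats b)
      = pvRenderO ats (pvOuterB (ats.length : Int)
          (pvPrefixSums 0 (ats.map (pvFlag tts))) b w)
      ∧ pvValid (ats.length : Int)
          (pvOuterB (ats.length : Int) (pvPrefixSums 0 (ats.map (pvFlag tts))) b w) := by
  have hnn : ∀ x, 0 ≤ pvNovA ats tts x w := fun x => Int.natCast_nonneg _
  have hcongr : (PySem.List.pyRange 0 ((ats.length : Int) - w + 1) 1).foldl
        (pvStepB (pvPrefixSums 0 (ats.map (pvFlag tts))) w) (-1, 0)
      = (PySem.List.pyRange 0 ((ats.length : Int) - w + 1) 1).foldl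
        (fun q x => if q.1 < pvNovA ats tts x w then (pvNovA ats tts x w, x) else q) (-1, 0) := by
    apply PySem.List.foldl_congr_mem
    intro acc x hx
    rw [PySem.List.mem_pyRange_one] at hx
    unfold pvStepB
    rw [pvNov_eq ats tts x w (by omega) (by omega) (by omega)]
  obtain ⟨x, hx0, hx1, hscan⟩ := pvScan_mem (fun y => pvNovA ats tts y w) 0
    ((ats.length : Int) - w + 1) (by omega) hnn
  have hstep : pvStepA ats tts w = fun st start =>
      if pvOptLt st.2 (pvScoreA w (pvNovA ats tts start w))
      then (PySem.List.slice ats (some start) (some (start + w)),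
            some (pvScoreA w (pvNovA ats tts start w)))
      else st := by
    funext st start
    simp only [pvStepA, pvNovA, pvScoreA]
  have hxw : x + w ≤ (ats.length : Int) := by omega
  have hnvx : ¬ (pvNovA ats tts x w = -1) := by have := hnn x; omega
  cases b with
  | none =>
      rw [hstep]
      have hfold := pvFold_render none [] (fun y => PySem.List.slice ats (some y) (some (y + w)))
        (pvScoreA w) (fun y => pvNovA ats tts y w) (pvScoreA_mono w)
        (PySem.List.pyRange 0 ((ats.length : Int) - w + 1) 1)
        (fun y _ => hnn y) (-1, 0) (Or.inl rfl)
      have hinit : pvRenderO ats none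
          = pvRender none [] (fun y => PySem.List.slice ats (some y) (some (y + w)))
              (pvScoreA w) (-1, 0) := by simp [pvRenderO, pvRender]
      rw [hinit, hfold, hscan]
      unfold pvOuterB
      rw [hcongr, hscan]
      refine ⟨?_, ?_⟩
      · simp only [pvRender, pvRenderO, pvOptLt, hnvx, if_false, if_true]
        rw [pvScore_bridge]
      · simp only [pvValid]
        refine ⟨by omega, hw2, by omega⟩
  | some v =>
      obtain ⟨s4p, sp, wp⟩ := v
      rw [hstep]
      have hfold := pvFold_render (some s4p)
        (PySem.List.slice ats (some sp) (some (sp + wp)))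
        (fun y => PySem.List.slice ats (some y) (some (y + w)))
        (pvScoreA w) (fun y => pvNovA ats tts y w) (pvScoreA_mono w)
        (PySem.List.pyRange 0 ((ats.length : Int) - w + 1) 1)
        (fun y _ => hnn y) (-1, 0) (Or.inl rfl)
      have hinit : pvRenderO ats (some (s4p, sp, wp))
          = pvRender (some s4p) (PySem.List.slice ats (some sp) (some (sp + wp)))
              (fun y => PySem.List.slice ats (some y) (some (y + w)))
              (pvScoreA w) (-1, 0) := by simp [pvRenderO, pvRender]
      rw [hinit, hfold, hscan]
      unfold pvOuterB
      rw [hcongr, hscan]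
      dsimp only
      rw [pvScore_bridge]
      by_cases hcmp : s4p < pvScoreA w (pvNovA ats tts x w)
      · refine ⟨?_, ?_⟩
        · simp only [pvRender, pvRenderO, pvOptLt, hnvx, if_false, decide_eq_true_eq,
            if_pos hcmp]
        · simp only [pvValid, if_pos hcmp]
          refine ⟨by omega, hw2, by omega⟩
      · refine ⟨?_, ?_⟩
        · simp only [pvRender, pvRenderO, pvOptLt, hnvx, if_false, decide_eq_true_eq,
            if_neg hcmp]
        · simpa only [pvValid, if_neg hcmp] using hb

-- A's outer loop tracks B's outer loop
lemma pvOuter_fold (ats tts : List String) :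
    ∀ (Lw : List Int), (∀ w ∈ Lw, 2 ≤ w ∧ w ≤ (ats.length : Int)) →
    ∀ (b : Option (Int × Int × Int)), pvValid (ats.length : Int) b →
      Lw.foldl (fun st width =>
          (PySem.List.pyRange 0 ((ats.length : Int) - width + 1) 1).foldl
            (pvStepA ats tts width) st) (pvRenderO ats b)
        = pvRenderO ats (Lw.foldl
            (pvOuterB (ats.length : Int) (pvPrefixSums 0 (ats.map (pvFlag tts)))) b)
      ∧ pvValid (ats.length : Int)
          (Lw.foldl (pvOuterB (ats.length : Int) (pvPrefixSums 0 (ats.map (pvFlag tts)))) b) := by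
  intro Lw
  induction Lw with
  | nil => intro _ b hb; exact ⟨rfl, hb⟩
  | cons w t ih =>
      intro hmem b hb
      obtain ⟨hw2, hwn⟩ := hmem w (by simp)
      obtain ⟨h1, h2⟩ := pvOuter_step ats tts w hw2 hwn b hb
      simp only [List.foldl_cons]
      rw [h1]
      exact ih (fun y hy => hmem y (by simp [hy])) _ h2

lemma pvOuterB_isSome (n : Int) (pref : List Int) (b : Option (Int × Int × Int)) (w : Int) :
    ∃ y, pvOuterB n pref b w = some y := by
  cases b with
  | none => exact ⟨_, rfl⟩
  | some v =>
      unfold pvOuterB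
      dsimp only
      split <;> first | exact ⟨_, rfl⟩ | (split <;> exact ⟨_, rfl⟩)

lemma pvOuterFold_isSome (n : Int) (pref : List Int) :
    ∀ (Lw : List Int) (b : Option (Int × Int × Int)), Lw ≠ [] →
      ∃ y, Lw.foldl (pvOuterB n pref) b = some y := by
  intro Lw
  induction Lw with
  | nil => intro b h; exact absurd rfl h
  | cons w t ih =>
      intro b _
      cases t with
      | nil =>
          simp only [List.foldl_cons, List.foldl_nil]
          exact pvOuterB_isSome n pref b w
      | cons w2 t2 => exact ih _ (by simp)

lemma pvSlice_ne_nil (ats : List String) (s w : Int) (hs : 0 ≤ s) (hw : 2 ≤ w)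
    (hsw : s + w ≤ (ats.length : Int)) :
    PySem.List.slice ats (some s) (some (s + w)) ≠ [] := by
  rw [PySem.List.slice_toNat _ hs (by omega)]
  intro hc
  have := congrArg List.length hc
  simp at this
  omega

-- ===== VERDICT (by name: the statement is the Claim_ definition above) =====
theorem select_salient_ngram_spec : Claim_equal_select_salient_ngram := by
  unfold Claim_equal_select_salient_ngram
  intro ats tts _
  unfold Spec_select_salient_ngram
  by_cases h0 : ats = []
  · subst h0; rfl
  · have hlen : 1 ≤ ats.length := by
      cases ats with
      | nil => exact absurd rfl h0
      | cons a t => simp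
    by_cases h1 : ats.length = 1
    · unfold select_salient_ngram select_salient_ngram_alt
      rw [if_neg h0]
      have hmin : min 4 ((ats.length : Int)) + 1 = 2 := by rw [h1]; rfl
      have hlt : ((ats.length : Int)) < 2 := by omega
      simp only [hmin, hlt, if_true, PySem.List.pyRange_one_eq_nil (le_refl (2 : Int)),
        List.foldl_nil]
    · have h2 : 2 ≤ ats.length := by omega
      have h2i : ¬ ((ats.length : Int) < 2) := by omega
      unfold select_salient_ngram select_salient_ngram_alt
      rw [if_neg h0]
      dsimp only
      rw [if_neg h2i]
      have hpref : ats.foldl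
          (fun p token => p ++ [PySem.List.pyGetD p (-1) 0 + pvFlag tts token]) [(0 : Int)]
          = pvPrefixSums 0 (ats.map (pvFlag tts)) := by
        have := pvPref_build tts ats [] 0
        simpa using this
      rw [hpref]
      have hmem : ∀ w ∈ PySem.List.pyRange 2 (min 4 (ats.length : Int) + 1) 1,
          2 ≤ w ∧ w ≤ (ats.length : Int) := by
        intro w hw
        rw [PySem.List.mem_pyRange_one] at hw
        omega
      obtain ⟨hfold, hvalid⟩ := pvOuter_fold ats tts _ hmem none trivial
      have hne : PySem.List.pyRange 2 (min 4 (ats.length : Int) + 1) 1 ≠ [] := by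
        rw [PySem.List.pyRange_one_cons (by omega : (2:Int) < min 4 (ats.length : Int) + 1)]
        simp
      obtain ⟨y, hy⟩ := pvOuterFold_isSome (ats.length : Int)
        (pvPrefixSums 0 (ats.map (pvFlag tts))) _ none hne
      obtain ⟨s4, sx, wx⟩ := y
      rw [hy] at hfold hvalid
      obtain ⟨hs0, hw2, hswn⟩ := hvalid
      have hA : (PySem.List.pyRange 2 (min 4 (ats.length : Int) + 1) 1).foldl
          (fun st width =>
            (PySem.List.pyRange 0 ((ats.length : Int) - width + 1) 1).foldl
              (pvStepA ats tts width) st) ([], none)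
          = (PySem.List.slice ats (some sx) (some (sx + wx)), some s4) := hfold
      rw [hA, hy]
      rw [if_neg (pvSlice_ne_nil ats sx wx hs0 hw2 hswn)]
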